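-- pv_equiv track=rewrite | github.com/taxijjang/algorithm | 불량 사용자.py | solution
-- ===== SOURCE A (Python) =====
-- import itertools
--
-- def check(user_id: str, banned_id: str) -> bool:
--     if len(user_id) != len(banned_id):
--         return False
--
--     else:
--         for i in range(len(user_id)):
--             if banned_id[i] == '*' or user_id[i] == banned_id[i]:
--                 continue
--             else:
--                 return False
--
--         return True
--
-- def solution(user_id, banned_id):
--     answer = set()
--     result = [[] for _ in range(len(banned_id))]
--
--     for i in range(len(banned_id)):
--         for u in user_id:
--             if check(u, banned_id[i]):
--                 result[i].append(u)
--
--     result = list(itertools.product(*result))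
--
--     for r in result:
--         if len(set(r)) == len(banned_id):
--             answer.add("".join(sorted(set(r))))
--
--     return len(answer)
-- ===== SOURCE B (Python) =====
-- # B: same candidate precomputation, but a pruned DFS over pattern indices with a
-- # running 'used' list replaces itertools.product + distinctness filter.
-- def check(u, b):
--     return len(u) == len(b) and all(p == '*' or c == p for c, p in zip(u, b))
--
-- def solution(user_id, banned_id):
--     cands = [[u for u in user_id if check(u, b)] for b in banned_id]
--     answer = set()
--
--     def dfs(i, used):
--         if i == len(cands):
--             answer.add("".join(sorted(used)))
--             return
--         for u in cands[i]:
--             if u not in used: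
--                 dfs(i + 1, used + [u])
--
--     dfs(0, [])
--     return len(answer)
-- ===== Notes on version B (the rewrite author's own statement) =====
-- stated objective: alternative
-- what changed: Replaces itertools.product over all candidate tuples followed by a distinctness filter with a recursive DFS over pattern indices that threads a 'used' list, pruning duplicate users as it goes and inserting the dedup key only at full depth; the wildcard matcher is rewritten with zip/all.
import Mathlib
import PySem

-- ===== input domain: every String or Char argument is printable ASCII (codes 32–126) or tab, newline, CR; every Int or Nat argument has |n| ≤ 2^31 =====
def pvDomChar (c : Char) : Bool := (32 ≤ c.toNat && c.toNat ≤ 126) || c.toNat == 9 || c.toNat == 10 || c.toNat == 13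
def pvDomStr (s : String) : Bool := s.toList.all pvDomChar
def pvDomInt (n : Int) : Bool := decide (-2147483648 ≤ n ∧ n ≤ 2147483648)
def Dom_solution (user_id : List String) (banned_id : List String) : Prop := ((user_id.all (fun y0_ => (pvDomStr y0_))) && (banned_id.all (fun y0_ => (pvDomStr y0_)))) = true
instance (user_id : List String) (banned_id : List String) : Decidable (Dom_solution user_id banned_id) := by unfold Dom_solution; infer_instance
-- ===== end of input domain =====

-- B replaces the itertools.product + distinctness-filter enumeration of A with a pruned DFS
-- over pattern indices threading a 'used' list (objective: alternative algorithm, same results).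


-- ===== PORT A =====
-- A's check: per-index loop over the characters (after the length guard)
def checkLoop : List Char → List Char → Bool
  | [], _ => true
  | _ :: _, [] => true          -- never reached: only called with equal lengths
  | x :: xs, y :: ys => if y == '*' || x == y then checkLoop xs ys else false

def check (user_id : String) (banned_id : String) : Bool :=
  if user_id.toList.length ≠ banned_id.toList.length then false
  else checkLoop user_id.toList banned_id.toList

-- itertools.product(*result): rightmost factor varies fastest
def pyProduct : List (List String) → List (List String)
  | [] => [[]]
  | c :: cs => c.flatMap (fun x => (pyProduct cs).map (fun r => x :: r))

def solution (user_id : List String) (banned_id : List String) : Int :=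
  let result := banned_id.map (fun b =>
    user_id.foldl (fun acc u => if check u b then acc ++ [u] else acc) [])
  let prod := pyProduct result
  let answer : PySem.Set String := prod.foldl (fun ans r =>
    if (PySem.Set.ofList r).length == banned_id.length then
      PySem.Set.add ans (PySem.Str.join "" (PySem.List.sorted (PySem.Set.ofList r) (fun x => x) false))
    else ans) []
  (answer.length : Int)

-- ===== PORT B =====
-- B's check: length test plus all() over zip
def checkB (user_id : String) (banned_id : String) : Bool :=
  user_id.toList.length == banned_id.toList.length &&
    (user_id.toList.zip banned_id.toList).all (fun p => p.2 == '*' || p.1 == p.2)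

-- DFS over the remaining candidate lists, threading the 'used' list and the answer set
def dfsB : List (List String) → List String → PySem.Set String → PySem.Set String
  | [], used, ans => PySem.Set.add ans (PySem.Str.join "" (PySem.List.sorted used (fun x => x) false))
  | c :: cs, used, ans =>
      c.foldl (fun a u => if used.contains u then a else dfsB cs (used ++ [u]) a) ans

def solution_alt (user_id : List String) (banned_id : List String) : Int :=
  let cands := banned_id.map (fun b => user_id.filter (fun u => checkB u b))
  ((dfsB cands [] []).length : Int)

-- ===== PRECONDITION & SPEC =====
def Spec_solution (user_id : List String) (banned_id : List String) (out : Int) : Prop := out = solution_alt user_id banned_id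
instance (user_id : List String) (banned_id : List String) (out : Int) : Decidable (Spec_solution user_id banned_id out) := by unfold Spec_solution; infer_instance

-- ===== CLAIM (what is proved, stated in full; the proofs are below) =====
def Claim_equal_solution : Prop := ∀ (user_id : List String) (banned_id : List String), Dom_solution user_id banned_id → Spec_solution user_id banned_id (solution user_id banned_id)

-- ===== LEMMAS AND PROOFS =====

-- the two wildcard matchers agree
lemma checkLoop_eq (xs ys : List Char) :
    checkLoop xs ys = (xs.zip ys).all (fun p => p.2 == '*' || p.1 == p.2) := by
  induction xs generalizing ys with
  | nil => simp [checkLoop]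
  | cons x xs ih =>
    cases ys with
    | nil => simp [checkLoop]
    | cons y ys =>
      simp only [checkLoop, List.zip_cons_cons, List.all_cons]
      by_cases h : (y == '*' || x == y) = true
      · simp [h, ih]
      · simp [h]

lemma check_eq (u b : String) : check u b = checkB u b := by
  unfold check checkB
  by_cases h : u.toList.length = b.toList.length
  · rw [if_neg (fun hc => hc h), checkLoop_eq]
    have : (u.toList.length == b.toList.length) = true := by
      rw [beq_iff_eq]; exact h
    rw [this, Bool.true_and]
  · rw [if_pos h]
    have : (u.toList.length == b.toList.length) = false := by
      rw [beq_eq_false_iff_ne]; exact h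
    rw [this, Bool.false_and]

-- the candidate lists of the two ports coincide
lemma cands_eq (user_id : List String) (b : String) :
    user_id.foldl (fun acc u => if check u b then acc ++ [u] else acc) [] =
      user_id.filter (fun u => checkB u b) := by
  rw [PySem.List.foldl_append_if_eq_filter, List.nil_append]
  exact List.filter_congr (fun u _ => check_eq u b)

-- the DFS pruning condition, as a predicate on the tuple yet to be chosen
def okFrom (used : List String) : List String → Bool
  | [] => true
  | x :: xs => !used.contains x && okFrom (used ++ [x]) xs

lemma okFrom_iff (r : List String) : ∀ used : List String,
    (okFrom used r = true ↔ r.Nodup ∧ ∀ x ∈ r, x ∉ used) := by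
  induction r with
  | nil => intro used; simp [okFrom]
  | cons x xs ih =>
    intro used
    have hx : (!used.contains x) = true ↔ x ∉ used := by
      simp
    simp only [okFrom, Bool.and_eq_true, hx, ih (used ++ [x])]
    constructor
    · rintro ⟨hxu, hnd, hall⟩
      refine ⟨List.nodup_cons.mpr ⟨?_, hnd⟩, ?_⟩
      · intro hmem
        exact hall x hmem (by simp)
      · intro y hy
        rcases List.mem_cons.mp hy with rfl | hy'
        · exact hxu
        · intro hyu
          exact hall y hy' (by simp [hyu])
    · rintro ⟨hnd, hall⟩
      obtain ⟨hxxs, hnd'⟩ := List.nodup_cons.mp hnd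
      refine ⟨hall x (by simp), hnd', ?_⟩
      intro y hy hymem
      rcases List.mem_append.mp hymem with hyu | hyx
      · exact hall y (List.mem_cons_of_mem x hy) hyu
      · have hyx' : y = x := by simpa using hyx
        exact hxxs (hyx' ▸ hy)

-- elements of the product have the length of the factor list
lemma mem_pyProduct_length {cs : List (List String)} {r : List String}
    (h : r ∈ pyProduct cs) : r.length = cs.length := by
  induction cs generalizing r with
  | nil => simp [pyProduct] at h; simp [h]
  | cons c cs ih =>
    simp only [pyProduct, List.mem_flatMap, List.mem_map] at h
    obtain ⟨x, _, t, ht, rfl⟩ := h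
    simp [ih ht]

-- |set(r)| < |r| when r has duplicates
lemma ofList_length_lt_of_not_nodup (r : List String) (h : ¬ r.Nodup) :
    (PySem.Set.ofList r).length < r.length := by
  induction r using List.reverseRecOn with
  | nil => exact absurd List.nodup_nil h
  | append_singleton xs x ih =>
    rw [PySem.Set.ofList_append_singleton, PySem.Set.add_eq_ite]
    have hmem : x ∈ PySem.Set.ofList xs ↔ x ∈ xs := PySem.Set.mem_ofList xs x
    by_cases hx : x ∈ xs
    · rw [if_pos (hmem.mpr hx)]
      have := PySem.Set.length_ofList_le (xs := xs)
      simp only [List.length_append, List.length_singleton]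
      omega
    · rw [if_neg (fun hc => hx (hmem.mp hc))]
      have hnd : ¬ xs.Nodup := by
        intro hnd
        apply h
        rw [List.nodup_append]
        exact ⟨hnd, List.nodup_singleton x, fun a ha b hb => by
          simp only [List.mem_singleton] at hb
          subst hb
          exact fun heq => hx (heq ▸ ha)⟩
      have := ih hnd
      simp only [List.length_append, List.length_singleton]
      omega

-- |set(r)| = |r| iff r has no duplicates
lemma ofList_length_eq_iff (r : List String) :
    (PySem.Set.ofList r).length = r.length ↔ r.Nodup := by
  constructor
  · intro hl
    by_contra h
    exact absurd hl (Nat.ne_of_lt (ofList_length_lt_of_not_nodup r h))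
  · intro h
    rw [PySem.Set.ofList_eq_self_of_nodup r h]

-- the DFS equals a fold over the pruned product
lemma dfsB_eq (cs : List (List String)) :
    ∀ (used : List String) (ans : PySem.Set String),
      dfsB cs used ans =
        ((pyProduct cs).filter (fun r => okFrom used r)).foldl
          (fun a r => PySem.Set.add a
            (PySem.Str.join "" (PySem.List.sorted (used ++ r) (fun x => x) false))) ans := by
  induction cs with
  | nil =>
    intro used ans
    simp [dfsB, pyProduct, okFrom]
  | cons c cs ih =>
    intro used ans
    show c.foldl (fun a u => if used.contains u then a else dfsB cs (used ++ [u]) a) ans = _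
    induction c generalizing ans with
    | nil => simp [pyProduct]
    | cons u c ihc =>
      simp only [pyProduct, List.flatMap_cons, List.filter_append, List.foldl_append,
        List.foldl_cons]
      rw [ihc]
      congr 1
      by_cases h : used.contains u = true
      · have h' : u ∈ used := by simpa using h
        have hnil : ∀ r ∈ (pyProduct cs).map (fun t => u :: t), ¬ okFrom used r = true := by
          intro r hr
          simp only [List.mem_map] at hr
          obtain ⟨t, -, rfl⟩ := hr
          simp [okFrom, h']
        rw [if_pos h, List.filter_eq_nil_iff.mpr hnil, List.foldl_nil]
      · have h' : u ∉ used := by simpa using h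
        rw [if_neg h]
        rw [ih (used ++ [u]) ans]
        have hfm : ((pyProduct cs).map (fun r => u :: r)).filter (fun r => okFrom used r) =
            ((pyProduct cs).filter (fun r => okFrom (used ++ [u]) r)).map (fun r => u :: r) := by
          rw [List.filter_map]
          congr 1
          apply List.filter_congr
          intro r _
          simp [Function.comp, okFrom, h']
        rw [hfm, List.foldl_map]
        apply PySem.List.foldl_congr_mem
        intro a r _
        rw [← List.append_cons]

-- ===== VERDICT (by name: the statement is the Claim_ definition above) =====
theorem solution_spec : Claim_equal_solution := by
  intro user_id banned_id _
  unfold Spec_solution solution solution_alt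
  dsimp only
  rw [show (banned_id.map (fun b =>
      user_id.foldl (fun acc u => if check u b then acc ++ [u] else acc) [])) =
      banned_id.map (fun b => user_id.filter (fun u => checkB u b)) from
    List.map_congr_left (fun b _ => cands_eq user_id b)]
  set cands := banned_id.map (fun b => user_id.filter (fun u => checkB u b)) with hcands
  congr 1
  rw [dfsB_eq cands [] []]
  rw [← List.foldl_filter]
  have hlen : cands.length = banned_id.length := by simp [hcands]
  have hpred : ∀ r ∈ pyProduct cands,
      ((PySem.Set.ofList r).length == banned_id.length) = okFrom [] r := by
    intro r hr
    have hr' : r.length = banned_id.length := by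
      rw [mem_pyProduct_length hr, hlen]
    by_cases h : r.Nodup
    · have h1 := (ofList_length_eq_iff r).mpr h
      have h2 : okFrom [] r = true := (okFrom_iff r []).mpr ⟨h, by simp⟩
      rw [h2, h1, hr', beq_self_eq_true]
    · have hne : (PySem.Set.ofList r).length ≠ banned_id.length := by
        rw [← hr']
        exact fun he => h ((ofList_length_eq_iff r).mp he)
      have h2 : okFrom [] r = false := by
        rw [Bool.eq_false_iff]
        intro hok
        exact h ((okFrom_iff r []).mp hok).1
      rw [h2, beq_eq_false_iff_ne]
      exact hne
  rw [List.filter_congr hpred]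
  apply congrArg List.length
  apply PySem.List.foldl_congr_mem
  intro a r hr
  have hnd : r.Nodup := ((okFrom_iff r []).mp (List.of_mem_filter hr)).1
  rw [PySem.Set.ofList_eq_self_of_nodup r hnd, List.nil_append]
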